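-- pv_equiv track=rewrite | github.com/neurodesk/neurocontainers | recipes/musclemap/musclemap.py | _select_metrics_summary_fields
-- ===== SOURCE A (Python) =====
-- def _select_metrics_summary_fields(fieldnames, label_field, max_fields=3):
--     preferred_tokens = (
--         "csa",
--         "fat",
--         "fraction",
--         "ff",
--         "volume",
--         "area",
--         "mean",
--         "average",
--         "slice",
--         "count",
--     )
--     selected = []
--     for token in preferred_tokens:
--         for field in fieldnames:
--             if field == label_field or field in selected:
--                 continue
--             if token in field.lower():
--                 selected.append(field)
--                 if len(selected) >= max_fields:
--                     return selected
--     for field in fieldnames: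
--         if field != label_field and field not in selected:
--             selected.append(field)
--             if len(selected) >= max_fields:
--                 return selected
--     return selected
-- ===== SOURCE B (Python) =====
-- def _select_metrics_summary_fields(fieldnames, label_field, max_fields=3):
--     preferred_tokens = (
--         "csa",
--         "fat",
--         "fraction",
--         "ff",
--         "volume",
--         "area",
--         "mean",
--         "average",
--         "slice",
--         "count",
--     )
--     # One pass: dedup (keeping first occurrence, skipping the label) and give each
--     # candidate a priority key = index of the first preferred token its lowercase
--     # form contains (len(preferred_tokens) if none); then one stable sort by key.
--     candidates = []
--     seen = set()
--     for field in fieldnames: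
--         if field == label_field or field in seen:
--             continue
--         seen.add(field)
--         low = field.lower()
--         key = len(preferred_tokens)
--         for i, tok in enumerate(preferred_tokens):
--             if tok in low:
--                 key = i
--                 break
--         candidates.append((key, field))
--     candidates.sort(key=lambda kv: kv[0])
--     selected = []
--     for _, field in candidates:
--         selected.append(field)
--         if len(selected) >= max_fields:
--             return selected
--     return selected
-- ===== Notes on version B (the rewrite author's own statement) =====
-- stated objective: faster
-- what changed: Replaces A's ten token-by-token rescans of fieldnames (each with a linear 'field in selected' membership scan) by one pass that deduplicates fields via a set and precomputes each field's first-matching-token priority, one stable sort by that priority, and a single capped selection loop.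
import Mathlib
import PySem

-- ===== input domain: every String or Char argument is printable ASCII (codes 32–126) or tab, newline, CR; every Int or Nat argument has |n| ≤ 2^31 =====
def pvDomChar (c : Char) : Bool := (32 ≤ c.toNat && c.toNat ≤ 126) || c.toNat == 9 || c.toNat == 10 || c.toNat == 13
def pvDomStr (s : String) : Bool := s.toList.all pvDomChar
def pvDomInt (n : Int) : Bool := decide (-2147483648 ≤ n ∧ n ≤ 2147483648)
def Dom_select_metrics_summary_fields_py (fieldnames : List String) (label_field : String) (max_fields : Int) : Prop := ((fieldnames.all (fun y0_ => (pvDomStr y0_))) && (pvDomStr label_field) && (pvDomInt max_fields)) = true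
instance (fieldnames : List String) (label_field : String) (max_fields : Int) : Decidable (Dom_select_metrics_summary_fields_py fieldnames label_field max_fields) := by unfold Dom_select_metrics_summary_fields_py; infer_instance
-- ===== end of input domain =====

-- B replaces A's ten nested token-by-token rescans of `fieldnames` (with linear
-- `field in selected` scans) with one dedup pass that precomputes each field's
-- first-matching-token priority, a single stable sort by that priority, and one
-- capped selection loop (objective: faster; measured).

-- ===== PORT A =====
def pvTokensA : List String :=
  ["csa", "fat", "fraction", "ff", "volume", "area", "mean", "average", "slice", "count"]

-- inner `for field in fieldnames` loop of the token phase; Bool = returned early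
def pvAinner (label_field : String) (max_fields : Int) (token : String) :
    List String → List String → List String × Bool
  | [], selected => (selected, false)
  | f :: rest, selected =>
    if f = label_field ∨ f ∈ selected then pvAinner label_field max_fields token rest selected
    else if PySem.Str.isIn token (PySem.Str.lower f) then
      if max_fields ≤ ((selected ++ [f]).length : Int) then (selected ++ [f], true)
      else pvAinner label_field max_fields token rest (selected ++ [f])
    else pvAinner label_field max_fields token rest selected

-- outer `for token in preferred_tokens` loop
def pvAtokens (label_field : String) (max_fields : Int) (fieldnames : List String) :
    List String → List String → List String × Bool
  | [], selected => (selected, false)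
  | t :: ts, selected =>
    match pvAinner label_field max_fields t fieldnames selected with
    | (sel, true) => (sel, true)
    | (sel, false) => pvAtokens label_field max_fields fieldnames ts sel

-- trailing fill loop
def pvAfill (label_field : String) (max_fields : Int) :
    List String → List String → List String × Bool
  | [], selected => (selected, false)
  | f :: rest, selected =>
    if f ≠ label_field ∧ f ∉ selected then
      if max_fields ≤ ((selected ++ [f]).length : Int) then (selected ++ [f], true)
      else pvAfill label_field max_fields rest (selected ++ [f])
    else pvAfill label_field max_fields rest selected

def select_metrics_summary_fields_py (fieldnames : List String) (label_field : String) (max_fields : Int) : List String :=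
  match pvAtokens label_field max_fields fieldnames pvTokensA [] with
  | (sel, true) => sel
  | (sel, false) => (pvAfill label_field max_fields fieldnames sel).1

-- ===== PORT B =====
def pvTokensB : List String :=
  ["csa", "fat", "fraction", "ff", "volume", "area", "mean", "average", "slice", "count"]

-- `for i, tok in enumerate(preferred_tokens): if tok in low: key = i; break`
def pvBfirstTok (low : String) : List String → Int → Option Int
  | [], _ => none
  | t :: ts, i => if PySem.Str.isIn t low then some i else pvBfirstTok low ts (i + 1)

def pvBkey (low : String) : Int := (pvBfirstTok low pvTokensB 0).getD (pvTokensB.length : Int)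

-- the candidate-building pass: dedup keeping first occurrence, skip the label, pair each field with its key
def pvBcands (label_field : String) :
    List String → PySem.Set String → List (Int × String) → List (Int × String)
  | [], _, cands => cands
  | f :: rest, seen, cands =>
    if f = label_field ∨ PySem.Set.contains seen f then pvBcands label_field rest seen cands
    else pvBcands label_field rest (PySem.Set.add seen f)
        (cands ++ [(pvBkey (PySem.Str.lower f), f)])

-- the capped selection loop over the sorted candidates
def pvBtake (max_fields : Int) : List (Int × String) → List String → List String
  | [], selected => selected
  | (_, f) :: rest, selected =>
    if max_fields ≤ ((selected ++ [f]).length : Int) then selected ++ [f]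
    else pvBtake max_fields rest (selected ++ [f])

def select_metrics_summary_fields_py_alt (fieldnames : List String) (label_field : String) (max_fields : Int) : List String :=
  pvBtake max_fields
    (PySem.List.sorted (pvBcands label_field fieldnames PySem.Set.empty []) (fun kv => kv.1)) []

-- ===== PRECONDITION & SPEC =====
def Spec_select_metrics_summary_fields_py (fieldnames : List String) (label_field : String) (max_fields : Int) (out : List String) : Prop := out = select_metrics_summary_fields_py_alt fieldnames label_field max_fields
instance (fieldnames : List String) (label_field : String) (max_fields : Int) (out : List String) : Decidable (Spec_select_metrics_summary_fields_py fieldnames label_field max_fields out) := by unfold Spec_select_metrics_summary_fields_py; infer_instance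

-- ===== CLAIM (what is proved, stated in full; the proofs are below) =====
def Claim_equal_select_metrics_summary_fields_py : Prop := ∀ (fieldnames : List String) (label_field : String) (max_fields : Int), Dom_select_metrics_summary_fields_py fieldnames label_field max_fields → Spec_select_metrics_summary_fields_py fieldnames label_field max_fields (select_metrics_summary_fields_py fieldnames label_field max_fields)

-- ===== LEMMAS AND PROOFS =====

-- Proof-layer common machinery ------------------------------------------------

-- the priority of a field as a Nat: index of the first preferred token contained in its lowercase form
def pvNatKey (f : String) : Nat :=
  (pvTokensB.findIdx? (fun t => PySem.Str.isIn t (PySem.Str.lower f))).getD 10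

-- the capped appending loop both programs end with
def pvCap (m : Int) : List String → List String → List String × Bool
  | sel, [] => (sel, false)
  | sel, f :: rest =>
    if m ≤ ((sel ++ [f]).length : Int) then (sel ++ [f], true) else pvCap m (sel ++ [f]) rest

-- the (uncapped) fields appended by one pass over `fieldnames` with test `test`
def pvGen (l : String) (test : String → Bool) : List String → List String → List String
  | [], _ => []
  | f :: r, sel =>
    if f = l ∨ f ∈ sel then pvGen l test r sel
    else if test f then f :: pvGen l test r (sel ++ [f])
    else pvGen l test r sel

-- the (uncapped) fields appended by the whole token phase
def pvGenTokens (l : String) (fs : List String) : List String → List String → List String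
  | [], _ => []
  | t :: ts, sel =>
    pvGen l (fun f => PySem.Str.isIn t (PySem.Str.lower f)) fs sel ++
      pvGenTokens l fs ts (sel ++ pvGen l (fun f => PySem.Str.isIn t (PySem.Str.lower f)) fs sel)

-- key facts -------------------------------------------------------------------

lemma pvBfirstTok_eq_findIdx? (low : String) : ∀ (ts : List String) (i : Int),
    pvBfirstTok low ts i = (ts.findIdx? (fun t => PySem.Str.isIn t low)).map (fun k => i + (k : Int)) := by
  intro ts
  induction ts with
  | nil => intro i; rw [pvBfirstTok, List.findIdx?_nil]; rfl
  | cons t ts ih =>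
    intro i
    rw [pvBfirstTok, List.findIdx?_cons]
    by_cases h : PySem.Str.isIn t low = true
    · rw [if_pos h, if_pos h]; simp
    · rw [if_neg h, if_neg h, ih (i + 1)]
      cases List.findIdx? (fun t => PySem.Str.isIn t low) ts with
      | none => rfl
      | some k => simp; omega

lemma pvBkey_eq_natKey (f : String) : pvBkey (PySem.Str.lower f) = (pvNatKey f : Int) := by
  unfold pvBkey pvNatKey
  rw [pvBfirstTok_eq_findIdx?]
  cases hfi : List.findIdx? (fun t => PySem.Str.isIn t (PySem.Str.lower f)) pvTokensB with
  | none => simp [pvTokensB]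
  | some k => simp

lemma pvNatKey_le (f : String) : pvNatKey f ≤ 10 := by
  unfold pvNatKey
  cases hfi : List.findIdx? (fun t => PySem.Str.isIn t (PySem.Str.lower f)) pvTokensB with
  | none => simp
  | some k =>
    rw [List.findIdx?_eq_some_iff_findIdx_eq] at hfi
    have := hfi.1
    simp [pvTokensB] at this
    simp; omega

lemma pvNatKey_match {f : String} {i : Nat} (h : pvNatKey f = i) (hi : i < 10) :
    PySem.Str.isIn (pvTokensB[i]'(by simp [pvTokensB]; omega)) (PySem.Str.lower f) = true := by
  unfold pvNatKey at h
  cases hfi : List.findIdx? (fun t => PySem.Str.isIn t (PySem.Str.lower f)) pvTokensB with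
  | none => rw [hfi] at h; simp at h; omega
  | some k =>
    rw [hfi] at h; simp at h; subst h
    rw [List.findIdx?_eq_some_iff_getElem] at hfi
    exact hfi.2.1

lemma pvNatKey_min {f : String} {j : Nat} (hj : j < 10)
    (h : PySem.Str.isIn (pvTokensB[j]'(by simp [pvTokensB]; omega)) (PySem.Str.lower f) = true) :
    pvNatKey f ≤ j := by
  unfold pvNatKey
  cases hfi : List.findIdx? (fun t => PySem.Str.isIn t (PySem.Str.lower f)) pvTokensB with
  | none =>
    rw [List.findIdx?_eq_none_iff] at hfi
    have := hfi _ (List.getElem_mem (l := pvTokensB) (h := by simp [pvTokensB]; omega))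
    rw [h] at this; simp at this
  | some k =>
    rw [List.findIdx?_eq_some_iff_getElem] at hfi
    obtain ⟨hk, _, hmin⟩ := hfi
    simp only [Option.getD_some]
    by_contra hlt
    have := hmin j (by omega)
    rw [h] at this; simp at this

-- pvCap facts ------------------------------------------------------------------

lemma pvCap_false {m : Int} : ∀ {xs sel : List String},
    (pvCap m sel xs).2 = false → pvCap m sel xs = (sel ++ xs, false) := by
  intro xs
  induction xs with
  | nil => intro sel _; simp [pvCap]
  | cons f rest ih =>
    intro sel h
    rw [pvCap] at h ⊢
    split_ifs at h ⊢ with hm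
    · rw [ih h]; simp

lemma pvCap_append (m : Int) : ∀ (xs ys sel : List String),
    pvCap m sel (xs ++ ys) =
      match pvCap m sel xs with
      | (s, true) => (s, true)
      | (s, false) => pvCap m s ys := by
  intro xs
  induction xs with
  | nil => intro ys sel; simp [pvCap]
  | cons f rest ih =>
    intro ys sel
    rw [List.cons_append, pvCap, pvCap]
    split_ifs with hm
    · simp
    · exact ih ys (sel ++ [f])

-- A's loops are the capped versions of the pvGen passes --------------------------

lemma pvAinner_eq_cap (l : String) (m : Int) (t : String) : ∀ (fs sel : List String),
    pvAinner l m t fs sel = pvCap m sel (pvGen l (fun f => PySem.Str.isIn t (PySem.Str.lower f)) fs sel) := by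
  intro fs
  induction fs with
  | nil => intro sel; simp [pvAinner, pvGen, pvCap]
  | cons f rest ih =>
    intro sel
    rw [pvAinner, pvGen]
    by_cases h1 : f = l ∨ f ∈ sel
    · rw [if_pos h1, if_pos h1, ih]
    · rw [if_neg h1, if_neg h1]
      by_cases h2 : PySem.Str.isIn t (PySem.Str.lower f) = true
      · rw [if_pos h2, if_pos h2, pvCap]
        split_ifs with hm
        · rfl
        · exact ih (sel ++ [f])
      · rw [if_neg h2, if_neg h2, ih]

lemma pvAfill_eq_cap (l : String) (m : Int) : ∀ (fs sel : List String),
    pvAfill l m fs sel = pvCap m sel (pvGen l (fun _ => true) fs sel) := by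
  intro fs
  induction fs with
  | nil => intro sel; simp [pvAfill, pvGen, pvCap]
  | cons f rest ih =>
    intro sel
    rw [pvAfill, pvGen]
    by_cases h1 : f = l ∨ f ∈ sel
    · rw [if_neg (by tauto), if_pos h1, ih]
    · rw [if_pos (by tauto), if_neg h1, if_pos rfl, pvCap]
      split_ifs with hm
      · rfl
      · exact ih (sel ++ [f])

lemma pvAtokens_eq_cap (l : String) (m : Int) (fs : List String) : ∀ (ts sel : List String),
    pvAtokens l m fs ts sel = pvCap m sel (pvGenTokens l fs ts sel) := by
  intro ts
  induction ts with
  | nil => intro sel; simp [pvAtokens, pvGenTokens, pvCap]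
  | cons t ts ih =>
    intro sel
    rw [pvAtokens, pvGenTokens, pvCap_append, pvAinner_eq_cap]
    cases hg : pvCap m sel (pvGen l (fun f => PySem.Str.isIn t (PySem.Str.lower f)) fs sel) with
    | mk s b =>
      cases b with
      | true => rfl
      | false =>
        have := pvCap_false (m := m) (xs := pvGen l (fun f => PySem.Str.isIn t (PySem.Str.lower f)) fs sel) (sel := sel) (by rw [hg])
        rw [hg] at this
        have hs : s = sel ++ pvGen l (fun f => PySem.Str.isIn t (PySem.Str.lower f)) fs sel := by
          have := congrArg Prod.fst this; simpa using this
        subst hs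
        exact ih _

-- MAIN invariant lemma: one pvGen pass with a test of priority i yields exactly the i-th group
lemma pvGen_filter (l : String) (test : String → Bool) (i : Nat) (S : List String)
    (h1 : ∀ v, pvNatKey v = i → test v = true) (h2 : ∀ v, test v = true → pvNatKey v ≤ i) :
    ∀ (fs sel seen : List String),
      (∀ f ∈ fs, f ≠ l → f ∈ S) →
      (∀ v, v ∈ sel ↔ ((pvNatKey v < i ∧ v ∈ S) ∨ (pvNatKey v = i ∧ v ∈ seen))) →
      pvGen l test fs sel = (pvGen l (fun _ => true) fs seen).filter (fun f => pvNatKey f == i) := by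
  intro fs
  induction fs with
  | nil => intro sel seen _ _; simp [pvGen]
  | cons f r ih =>
    intro sel seen hS hI
    have hSr : ∀ g ∈ r, g ≠ l → g ∈ S := fun g hg => hS g (List.mem_cons_of_mem _ hg)
    by_cases hfl : f = l
    · rw [pvGen, pvGen, if_pos (Or.inl hfl), if_pos (Or.inl hfl)]
      exact ih sel seen hSr hI
    · have hfS : f ∈ S := hS f (by simp) hfl
      by_cases hseen : f ∈ seen
      · rw [pvGen, pvGen, if_pos (Or.inr hseen)]
        rcases Nat.lt_trichotomy (pvNatKey f) i with hk | hk | hk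
        · rw [if_pos (Or.inr ((hI f).2 (Or.inl ⟨hk, hfS⟩)))]
          exact ih sel seen hSr hI
        · rw [if_pos (Or.inr ((hI f).2 (Or.inr ⟨hk, hseen⟩)))]
          exact ih sel seen hSr hI
        · have hnsel : f ∉ sel := by
            intro hf
            rcases (hI f).1 hf with ⟨h', _⟩ | ⟨h', _⟩ <;> omega
          have ht : test f = false := by
            cases hts : test f
            · rfl
            · exact absurd (h2 f hts) (by omega)
          rw [if_neg (by tauto), if_neg (by simp [ht])]
          exact ih sel seen hSr hI
      · rw [pvGen, pvGen, if_neg (show ¬(f = l ∨ f ∈ seen) by tauto),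
          if_pos (rfl : (fun _ => true) f = true), List.filter_cons]
        rcases Nat.lt_trichotomy (pvNatKey f) i with hk | hk | hk
        · have hfsel : f ∈ sel := (hI f).2 (Or.inl ⟨hk, hfS⟩)
          rw [if_pos (show f = l ∨ f ∈ sel from Or.inr hfsel)]
          have hne : (pvNatKey f == i) = false := by simp; omega
          rw [hne, if_neg (by simp)]
          apply ih sel (seen ++ [f]) hSr
          intro v
          rw [hI v]
          constructor
          · rintro (⟨h', hv⟩ | ⟨h', hv⟩)
            · exact Or.inl ⟨h', hv⟩
            · exact Or.inr ⟨h', by simp [hv]⟩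
          · rintro (⟨h', hv⟩ | ⟨h', hv⟩)
            · exact Or.inl ⟨h', hv⟩
            · rcases List.mem_append.1 hv with hv' | hv'
              · exact Or.inr ⟨h', hv'⟩
              · exfalso
                have : v = f := by simpa using hv'
                subst this
                omega
        · have hnsel : f ∉ sel := by
            intro hf
            rcases (hI f).1 hf with ⟨h', _⟩ | ⟨h', hv⟩
            · omega
            · exact hseen hv
          rw [if_neg (show ¬(f = l ∨ f ∈ sel) by tauto), h1 f hk, if_pos rfl]
          have heq : (pvNatKey f == i) = true := by simp [hk]
          rw [heq, if_pos (by simp)]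
          congr 1
          apply ih (sel ++ [f]) (seen ++ [f]) hSr
          intro v
          constructor
          · intro hv
            rcases List.mem_append.1 hv with hv' | hv'
            · rcases (hI v).1 hv' with ⟨h', hv''⟩ | ⟨h', hv''⟩
              · exact Or.inl ⟨h', hv''⟩
              · exact Or.inr ⟨h', by simp [hv'']⟩
            · have : v = f := by simpa using hv'
              subst this
              exact Or.inr ⟨hk, by simp⟩
          · rintro (⟨h', hv⟩ | ⟨h', hv⟩)
            · exact List.mem_append.2 (Or.inl ((hI v).2 (Or.inl ⟨h', hv⟩)))
            · rcases List.mem_append.1 hv with hv' | hv'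
              · exact List.mem_append.2 (Or.inl ((hI v).2 (Or.inr ⟨h', hv'⟩)))
              · exact List.mem_append.2 (Or.inr hv')
        · have hnsel : f ∉ sel := by
            intro hf
            rcases (hI f).1 hf with ⟨h', _⟩ | ⟨h', _⟩ <;> omega
          have ht : test f = false := by
            cases hts : test f
            · rfl
            · exact absurd (h2 f hts) (by omega)
          rw [if_neg (show ¬(f = l ∨ f ∈ sel) by tauto), if_neg (by simp [ht])]
          have hne : (pvNatKey f == i) = false := by simp; omega
          rw [hne, if_neg (by simp)]
          apply ih sel (seen ++ [f]) hSr
          intro v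
          rw [hI v]
          constructor
          · rintro (⟨h', hv⟩ | ⟨h', hv⟩)
            · exact Or.inl ⟨h', hv⟩
            · exact Or.inr ⟨h', by simp [hv]⟩
          · rintro (⟨h', hv⟩ | ⟨h', hv⟩)
            · exact Or.inl ⟨h', hv⟩
            · rcases List.mem_append.1 hv with hv' | hv'
              · exact Or.inr ⟨h', hv'⟩
              · exfalso
                have : v = f := by simpa using hv'
                subst this
                omega

-- every non-label field value occurs among the candidates
lemma pvMem_gen_true (l : String) : ∀ (fs seen : List String) (f : String),
    f ∈ fs → f ≠ l → f ∈ seen ∨ f ∈ pvGen l (fun _ => true) fs seen := by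
  intro fs
  induction fs with
  | nil => intro seen f hf; simp at hf
  | cons g r ih =>
    intro seen f hf hfl
    by_cases hg : g = l ∨ g ∈ seen
    · rw [pvGen, if_pos hg]
      rcases List.mem_cons.1 hf with hv | hv
      · subst hv
        rcases hg with hg | hg
        · exact absurd hg hfl
        · exact Or.inl hg
      · exact ih seen f hv hfl
    · rw [pvGen, if_neg hg, if_pos (rfl : (fun _ => true) g = true)]
      rcases List.mem_cons.1 hf with hv | hv
      · subst hv; exact Or.inr (by simp)
      · rcases ih (seen ++ [g]) f hv hfl with h' | h'
        · rcases List.mem_append.1 h' with h'' | h''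
          · exact Or.inl h''
          · have hfg : f = g := by simpa using h''
            exact Or.inr (by simp [hfg])
        · exact Or.inr (by simp [h'])

-- the token phase yields the groups 0..9 in order
lemma pvGenTokens_groups (l : String) (fs : List String) (hC : ∀ f ∈ fs, f ≠ l → f ∈ pvGen l (fun _ => true) fs []) :
    ∀ (n i : Nat) (sel : List String), i + n = 10 →
      (∀ v, v ∈ sel ↔ (pvNatKey v < i ∧ v ∈ pvGen l (fun _ => true) fs [])) →
      pvGenTokens l fs (pvTokensB.drop i) sel =
        ((List.range 10).drop i).flatMap
          (fun k => (pvGen l (fun _ => true) fs []).filter (fun f => pvNatKey f == k)) := by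
  intro n
  induction n with
  | zero =>
    intro i sel hi hsel
    have h10 : i = 10 := by omega
    subst h10
    rw [show pvTokensB.drop 10 = [] from rfl, show (List.range 10).drop 10 = [] from rfl]
    rfl
  | succ n ih =>
    intro i sel hi hsel
    have hilt : i < 10 := by omega
    have hit : i < pvTokensB.length := by simp [pvTokensB]; omega
    have hir : i < (List.range 10).length := by simp; omega
    rw [List.drop_eq_getElem_cons hit, List.drop_eq_getElem_cons hir, List.getElem_range]
    rw [pvGenTokens, List.flatMap_cons]
    have hg : pvGen l (fun f => PySem.Str.isIn (pvTokensB[i]'hit) (PySem.Str.lower f)) fs sel =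
        (pvGen l (fun _ => true) fs []).filter (fun f => pvNatKey f == i) := by
      apply pvGen_filter l _ i (pvGen l (fun _ => true) fs [])
        (fun v hv => pvNatKey_match hv hilt)
        (fun v hv => pvNatKey_min hilt hv)
        fs sel [] hC
      intro v
      rw [hsel v]
      simp
    rw [hg]
    congr 1
    apply ih (i + 1) _ (by omega)
    intro v
    simp only [List.mem_append, hsel v, List.mem_filter]
    constructor
    · rintro (⟨h', hv⟩ | ⟨hv, hke⟩)
      · exact ⟨by omega, hv⟩
      · have : pvNatKey v = i := by simpa using hke
        exact ⟨by omega, hv⟩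
    · rintro ⟨h', hv⟩
      by_cases hlt : pvNatKey v < i
      · exact Or.inl ⟨hlt, hv⟩
      · exact Or.inr ⟨hv, by simp; omega⟩

-- insertBy facts ----------------------------------------------------------------

lemma pvInsertBy_append {α : Type} (before : α → α → Bool) (x : α) :
    ∀ (A B : List α), (∀ y ∈ A, before x y = false) →
      PySem.List.insertBy before x (A ++ B) = A ++ PySem.List.insertBy before x B := by
  intro A
  induction A with
  | nil => intro B _; simp
  | cons a A ih =>
    intro B h
    rw [List.cons_append, PySem.List.insertBy, if_neg (by simp [h a (by simp)]), ih B (fun y hy => h y (by simp [hy]))]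
    rfl

lemma pvInsertBy_cons {α : Type} (before : α → α → Bool) (x : α) :
    ∀ (B : List α), (∀ y ∈ B, before x y = true) →
      PySem.List.insertBy before x B = x :: B := by
  intro B h
  cases B with
  | nil => rfl
  | cons b B => rw [PySem.List.insertBy, if_pos (h b (by simp))]

-- stable sort by key = concatenation of the key groups in increasing key order
lemma pvIns_groups (x : Int × String) : ∀ (ks : List Int) (xs : List (Int × String)),
    ks.Pairwise (· < ·) → x.1 ∈ ks →
    PySem.List.insertBy (fun a b => decide (a.1 < b.1)) x
        (ks.flatMap (fun k => xs.filter (fun p => p.1 == k))) =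
      ks.flatMap (fun k => (xs ++ [x]).filter (fun p => p.1 == k)) := by
  intro ks
  induction ks with
  | nil => intro xs _ hx; simp at hx
  | cons k ks ih =>
    intro xs hp hx
    have hpk : ∀ k' ∈ ks, k < k' := (List.pairwise_cons.1 hp).1
    rw [List.flatMap_cons, List.flatMap_cons]
    by_cases hxk : x.1 = k
    · rw [pvInsertBy_append _ _ _ _ (by
        intro y hy
        have hyk : y.1 = k := by simpa using (List.mem_filter.1 hy).2
        simp [hyk, hxk])]
      rw [pvInsertBy_cons _ _ _ (by
        intro y hy
        rcases List.mem_flatMap.1 hy with ⟨k', hk', hy'⟩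
        have hyk : y.1 = k' := by simpa using (List.mem_filter.1 hy').2
        simp [hyk, hxk]
        exact hpk k' hk')]
      rw [List.filter_append, show List.filter (fun p => p.1 == k) [x] = [x] by simp [hxk],
        List.append_cons]
      congr 1
      refine (List.flatMap_congr ?_).symm
      intro k' hk'
      rw [List.filter_append, show List.filter (fun p => p.1 == k') [x] = [] by
        simp
        intro h'
        have := hpk k' hk'
        omega]
      simp
    · have hx' : x.1 ∈ ks := by
        rcases List.mem_cons.1 hx with h | h
        · exact absurd h hxk
        · exact h
      have hkx : k < x.1 := hpk _ hx'
      rw [pvInsertBy_append _ _ _ _ (by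
        intro y hy
        have hyk : y.1 = k := by simpa using (List.mem_filter.1 hy).2
        simp [hyk]
        omega)]
      rw [ih xs (List.pairwise_cons.1 hp).2 hx']
      rw [List.filter_append, show List.filter (fun p => p.1 == k) [x] = [] by simp; omega]
      simp

lemma pvSort_groups (ks : List Int) (hks : ks.Pairwise (· < ·)) :
    ∀ (xs : List (Int × String)), (∀ p ∈ xs, p.1 ∈ ks) →
    PySem.List.sorted xs (fun p => p.1) = ks.flatMap (fun k => xs.filter (fun p => p.1 == k)) := by
  intro xs
  induction xs using List.reverseRecOn with
  | nil => intro _; simp [PySem.List.sorted]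
  | append_singleton xs x ih =>
    intro hmem
    rw [PySem.List.sorted_eq_foldl_insertBy, List.foldl_append, List.foldl_cons, List.foldl_nil,
      ← PySem.List.sorted_eq_foldl_insertBy, ih (fun p hp => hmem p (by simp [hp]))]
    exact pvIns_groups x ks xs hks (hmem x (by simp))

-- B's pieces --------------------------------------------------------------------

lemma pvBcands_eq (l : String) : ∀ (fs seen : List String) (acc : List (Int × String)),
    pvBcands l fs seen acc = acc ++ (pvGen l (fun _ => true) fs seen).map (fun f => (pvBkey (PySem.Str.lower f), f)) := by
  intro fs
  induction fs with
  | nil => intro seen acc; simp [pvBcands, pvGen]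
  | cons f r ih =>
    intro seen acc
    by_cases h : f = l ∨ f ∈ seen
    · have h' : f = l ∨ PySem.Set.contains seen f = true := by
        rcases h with h | h
        · exact Or.inl h
        · exact Or.inr ((PySem.Set.contains_iff seen f).2 h)
      rw [pvBcands, if_pos h', pvGen, if_pos h, ih]
    · have hns : ¬ PySem.Set.contains seen f = true := by
        intro hc
        exact h (Or.inr ((PySem.Set.contains_iff seen f).1 hc))
      have h' : ¬(f = l ∨ PySem.Set.contains seen f = true) := by tauto
      rw [pvBcands, if_neg h', pvGen, if_neg h, if_pos (rfl : (fun _ => true) f = true)]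
      have hmem : f ∉ seen := fun hm => h (Or.inr hm)
      have hadd : PySem.Set.add seen f = seen ++ [f] := by
        simp [PySem.Set.add, hmem]
      rw [hadd, ih]
      simp

lemma pvBtake_eq (m : Int) : ∀ (xs : List (Int × String)) (sel : List String),
    pvBtake m xs sel = (pvCap m sel (xs.map Prod.snd)).1 := by
  intro xs
  induction xs with
  | nil => intro sel; simp [pvBtake, pvCap]
  | cons p rest ih =>
    intro sel
    obtain ⟨k, f⟩ := p
    rw [pvBtake, List.map_cons, pvCap]
    split_ifs with hm
    · rfl
    · exact ih (sel ++ [f])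

-- assembly ----------------------------------------------------------------------

lemma pvSeq_eq (l : String) (fs : List String) :
    pvGenTokens l fs pvTokensB [] ++ pvGen l (fun _ => true) fs (pvGenTokens l fs pvTokensB []) =
      (List.range 11).flatMap
        (fun k => (pvGen l (fun _ => true) fs []).filter (fun f => pvNatKey f == k)) := by
  have hC : ∀ f ∈ fs, f ≠ l → f ∈ pvGen l (fun _ => true) fs [] := by
    intro f hf hfl
    rcases pvMem_gen_true l fs [] f hf hfl with h | h
    · simp at h
    · exact h
  have hT := pvGenTokens_groups l fs hC 10 0 [] rfl (by intro v; simp)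
  rw [List.drop_zero, List.drop_zero] at hT
  rw [hT]
  have hFill : pvGen l (fun _ => true) fs
      ((List.range 10).flatMap (fun k => (pvGen l (fun _ => true) fs []).filter (fun f => pvNatKey f == k))) =
      (pvGen l (fun _ => true) fs []).filter (fun f => pvNatKey f == 10) := by
    apply pvGen_filter l _ 10 (pvGen l (fun _ => true) fs []) (fun v _ => rfl)
      (fun v _ => pvNatKey_le v) fs _ [] hC
    intro v
    constructor
    · intro hv
      rcases List.mem_flatMap.1 hv with ⟨k, hk, hv'⟩
      rcases List.mem_filter.1 hv' with ⟨hvC, hke⟩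
      have hkeq : pvNatKey v = k := by simpa using hke
      have hklt : k < 10 := by simpa using hk
      exact Or.inl ⟨by omega, hvC⟩
    · rintro (⟨hlt, hvC⟩ | ⟨_, hv⟩)
      · exact List.mem_flatMap.2 ⟨pvNatKey v, by simp; omega, List.mem_filter.2 ⟨hvC, by simp⟩⟩
      · simp at hv
  rw [hFill]
  rw [show List.range 11 = List.range 10 ++ [10] by decide, List.flatMap_append,
    List.flatMap_singleton]

-- ===== VERDICT (by name: the statement is the Claim_ definition above) =====
theorem select_metrics_summary_fields_py_spec : Claim_equal_select_metrics_summary_fields_py := by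
  intro fs l m _
  show select_metrics_summary_fields_py fs l m = select_metrics_summary_fields_py_alt fs l m
  have hA : select_metrics_summary_fields_py fs l m =
      (pvCap m [] (pvGenTokens l fs pvTokensB [] ++
        pvGen l (fun _ => true) fs (pvGenTokens l fs pvTokensB []))).1 := by
    rw [select_metrics_summary_fields_py, show pvTokensA = pvTokensB from rfl,
      pvAtokens_eq_cap, pvCap_append]
    cases hT : pvCap m [] (pvGenTokens l fs pvTokensB []) with
    | mk s b =>
      cases b with
      | true => rfl
      | false =>
        have hs := pvCap_false (m := m) (xs := pvGenTokens l fs pvTokensB []) (sel := []) (by rw [hT])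
        rw [hT] at hs
        have hseq : s = pvGenTokens l fs pvTokensB [] := by
          have := congrArg Prod.fst hs
          simpa using this
        subst hseq
        show (pvAfill l m fs (pvGenTokens l fs pvTokensB [])).1 =
          (pvCap m (pvGenTokens l fs pvTokensB [])
            (pvGen l (fun _ => true) fs (pvGenTokens l fs pvTokensB []))).1
        rw [pvAfill_eq_cap]
  have hB : select_metrics_summary_fields_py_alt fs l m =
      (pvCap m [] ((List.range 11).flatMap
        (fun k => (pvGen l (fun _ => true) fs []).filter (fun f => pvNatKey f == k)))).1 := by
    rw [select_metrics_summary_fields_py_alt, pvBtake_eq,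
      show PySem.Set.empty = ([] : List String) from rfl, pvBcands_eq, List.nil_append]
    rw [List.map_congr_left (fun f _ => by rw [pvBkey_eq_natKey] :
      ∀ f ∈ pvGen l (fun _ => true) fs [], (pvBkey (PySem.Str.lower f), f) = ((pvNatKey f : Int), f))]
    rw [pvSort_groups ((List.range 11).map (fun k : Nat => (k : Int)))
      (List.pairwise_lt_range.map _ (by intro a b hab; exact_mod_cast hab))
      _ (by
        intro p hp
        rcases List.mem_map.1 hp with ⟨f, _, hf⟩
        subst hf
        exact List.mem_map.2 ⟨pvNatKey f, by simp [List.mem_range]; have := pvNatKey_le f; omega⟩)]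
    rw [List.flatMap_map]
    rw [List.map_flatMap]
    refine congrArg (fun xs => (pvCap m [] xs).1) ?_
    apply List.flatMap_congr
    intro k hk
    rw [List.filter_map]
    rw [List.map_map]
    rw [show (Prod.snd ∘ fun f => ((pvNatKey f : Int), f)) = id from rfl, List.map_id]
    apply List.filter_congr
    intro f _
    show (((pvNatKey f : Int)) == ((k : Nat) : Int)) = (pvNatKey f == k)
    simp
  rw [hA, hB, pvSeq_eq]
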